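-- pv_equiv track=rewrite | github.com/lvsdvale/mlt-3 | algorithm.py | apply_mlt
-- ===== SOURCE A (Python) =====
-- from itertools import cycle
--
-- def apply_mlt(message: str) -> str:
--     signal_levels = cycle([1, 0, -1, 0])
--     signal_level = 0
--     encoded = list()
--
--     for bit in message:
--         signal_level = next(signal_levels) if bit == '1' else signal_level
--         encoded.append(signal_level)
--     return encoded
-- ===== SOURCE B (Python) =====
-- def apply_mlt(message: str):
--     # Pass 1: cumulative count of '1' characters up to each position.
--     counts = []
--     ones = 0
--     for bit in message:
--         if bit == '1':
--             ones += 1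
--         counts.append(ones)
--     # Pass 2: map each count to its MLT-3 level via the fixed pattern.
--     pattern = [1, 0, -1, 0]
--     return [0 if k == 0 else pattern[(k - 1) % 4] for k in counts]
-- ===== Notes on version B (the rewrite author's own statement) =====
-- stated objective: alternative
-- what changed: Replaces the itertools.cycle iterator and carried signal level by a two-pass decomposition: first build the prefix counts of '1' characters, then map each count arithmetically to pattern[(k-1)%4].
import Mathlib
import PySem

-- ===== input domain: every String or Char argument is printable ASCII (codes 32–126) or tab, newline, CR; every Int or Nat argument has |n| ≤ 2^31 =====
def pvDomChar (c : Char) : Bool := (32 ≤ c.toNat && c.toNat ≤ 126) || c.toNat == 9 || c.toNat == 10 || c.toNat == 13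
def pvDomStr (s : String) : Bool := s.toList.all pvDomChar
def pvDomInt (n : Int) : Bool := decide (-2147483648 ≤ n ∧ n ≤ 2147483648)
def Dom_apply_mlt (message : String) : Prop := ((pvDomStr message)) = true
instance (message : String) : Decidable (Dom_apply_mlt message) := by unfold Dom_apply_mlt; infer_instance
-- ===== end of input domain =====

-- B replaces A's itertools.cycle iterator + carried level by a two-pass prefix-count-then-map decomposition (alternative, same cost).


-- ===== PORT A =====
-- cycle([1,0,-1,0]): the k-th call to next returns this
def pvCycle (k : Nat) : Int :=
  match k % 4 with
  | 0 => 1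
  | 1 => 0
  | 2 => -1
  | _ => 0

-- state: (number of next() calls so far, signal_level, encoded)
def apply_mlt (message : String) : List Int :=
  (message.toList.foldl
    (fun (st : Nat × Int × List Int) bit =>
      let signal_level := if bit = '1' then pvCycle st.1 else st.2.1
      let i := if bit = '1' then st.1 + 1 else st.1
      (i, signal_level, st.2.2 ++ [signal_level]))
    (0, 0, [])).2.2

-- ===== PORT B =====
def pvLevel (k : Nat) : Int :=
  if k = 0 then 0 else pvCycle ((k - 1) % 4)

def apply_mlt_alt (message : String) : List Int :=
  let counts :=
    (message.toList.foldl
      (fun (p : Nat × List Nat) bit =>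
        let ones := if bit = '1' then p.1 + 1 else p.1
        (ones, p.2 ++ [ones]))
      (0, [])).2
  counts.map pvLevel

-- ===== PRECONDITION & SPEC =====
def Spec_apply_mlt (message : String) (out : List Int) : Prop := out = apply_mlt_alt message
instance (message : String) (out : List Int) : Decidable (Spec_apply_mlt message out) := by unfold Spec_apply_mlt; infer_instance

-- ===== CLAIM (what is proved, stated in full; the proofs are below) =====
def Claim_equal_apply_mlt : Prop := ∀ (message : String), Dom_apply_mlt message → Spec_apply_mlt message (apply_mlt message)

-- ===== LEMMAS AND PROOFS =====

-- proof-side helper: prefix counts of '1' continuing from count k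
def pvCounts (l : List Char) (k : Nat) : List Nat :=
  match l with
  | [] => []
  | c :: t => let k' := if c = '1' then k + 1 else k
              k' :: pvCounts t k'

lemma pvCycle_mod (k : Nat) : pvCycle (k % 4) = pvCycle k := by
  simp [pvCycle, Nat.mod_mod_of_dvd]

lemma pvLevel_succ (k : Nat) : pvLevel (k + 1) = pvCycle k := by
  simp [pvLevel, pvCycle_mod]

lemma foldB_spec (l : List Char) (k : Nat) (acc : List Nat) :
    (l.foldl
      (fun (p : Nat × List Nat) bit =>
        let ones := if bit = '1' then p.1 + 1 else p.1
        (ones, p.2 ++ [ones]))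
      (k, acc)).2 = acc ++ pvCounts l k := by
  induction l generalizing k acc with
  | nil => simp [pvCounts]
  | cons c t ih => simp [pvCounts, ih, List.append_assoc]

lemma foldA_spec (l : List Char) (k : Nat) (acc : List Int) :
    (l.foldl
      (fun (st : Nat × Int × List Int) bit =>
        let signal_level := if bit = '1' then pvCycle st.1 else st.2.1
        let i := if bit = '1' then st.1 + 1 else st.1
        (i, signal_level, st.2.2 ++ [signal_level]))
      (k, pvLevel k, acc)).2.2 = acc ++ (pvCounts l k).map pvLevel := by
  induction l generalizing k acc with
  | nil => simp [pvCounts]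
  | cons c t ih =>
    by_cases h : c = '1'
    · simpa [pvCounts, h, pvLevel_succ, List.append_assoc] using
        ih (k + 1) (acc ++ [pvCycle k])
    · simpa [pvCounts, h, List.append_assoc] using ih k (acc ++ [pvLevel k])

-- ===== VERDICT (by name: the statement is the Claim_ definition above) =====
theorem apply_mlt_spec : Claim_equal_apply_mlt := by
  intro message _
  show apply_mlt message = apply_mlt_alt message
  unfold apply_mlt apply_mlt_alt
  have hA := foldA_spec message.toList 0 []
  rw [show pvLevel 0 = 0 from rfl] at hA
  rw [hA]
  simp [foldB_spec]
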